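-- pv_equiv track=rewrite | github.com/YukunQu/DCM | analysis/mri/event/cv_training.py | _split_whole_trials
-- ===== SOURCE A (Python) =====
-- def _split_whole_trials(trial_label):
--     i = 0
--     odd_trial = []
--     even_trial = []
--     for label in trial_label:
--         i += 1
--         if i % 2 == 0:
--             odd_trial.append(None)
--             even_trial.append(label)
--         else:
--             odd_trial.append(label)
--             even_trial.append(None)
--     return odd_trial, even_trial
-- ===== SOURCE B (Python) =====
-- def _split_whole_trials(trial_label):
--     seq = list(trial_label)
--     n = len(seq)
--     odd_trial = [None] * n
--     even_trial = [None] * n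
--     odd_trial[0::2] = seq[0::2]
--     even_trial[1::2] = seq[1::2]
--     return odd_trial, even_trial
-- ===== Notes on version B (the rewrite author's own statement) =====
-- stated objective: faster
-- what changed: Replaces the counter-driven loop with two appends per element by preallocating two None lists and filling them with strided slice assignment (odd[0::2]=seq[0::2], even[1::2]=seq[1::2]), which runs in C instead of bytecode per element.
import Mathlib
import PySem

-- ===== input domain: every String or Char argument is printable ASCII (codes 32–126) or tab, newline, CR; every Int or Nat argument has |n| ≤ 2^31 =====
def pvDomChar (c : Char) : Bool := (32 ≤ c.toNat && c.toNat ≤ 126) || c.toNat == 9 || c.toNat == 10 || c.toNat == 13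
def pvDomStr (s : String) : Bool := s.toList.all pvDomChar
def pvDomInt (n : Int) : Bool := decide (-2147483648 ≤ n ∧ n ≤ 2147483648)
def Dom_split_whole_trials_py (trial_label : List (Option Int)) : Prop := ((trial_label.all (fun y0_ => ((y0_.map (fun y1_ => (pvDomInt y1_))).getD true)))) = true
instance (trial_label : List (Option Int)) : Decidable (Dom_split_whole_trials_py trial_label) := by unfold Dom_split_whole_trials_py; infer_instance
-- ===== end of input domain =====

-- B replaces A's counter loop with preallocated None lists filled by strided slice assignment (idiomatic; return value equivalence).

-- ===== PORT A =====
-- loop body of A's for-loop: state is (i, odd_trial, even_trial); i stays ≥ 0, where Lean's % on Int agrees with Python's %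
def pvStepA (st : Int × List (Option Int) × List (Option Int)) (label : Option Int) : Int × List (Option Int) × List (Option Int) :=
  let i := st.1 + 1
  if i % 2 == 0 then (i, st.2.1 ++ [none], st.2.2 ++ [label])
  else (i, st.2.1 ++ [label], st.2.2 ++ [none])

def split_whole_trials_py (trial_label : List (Option Int)) : List (Option Int) × List (Option Int) :=
  let r := trial_label.foldl pvStepA (0, [], [])
  (r.2.1, r.2.2)

-- ===== PORT B =====
-- hand port of Python slice assignment dst[0::2] = vals (flag true) / dst[1::2] = vals (flag false);
-- exact here because the number of values always equals the number of slots
def setStride2 : Bool → List (Option Int) → List (Option Int) → List (Option Int)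
  | _, xs, [] => xs
  | _, [], _ => []
  | true, _ :: xs, v :: vs => v :: setStride2 false xs vs
  | false, x :: xs, vs => x :: setStride2 true xs vs

def split_whole_trials_py_alt (trial_label : List (Option Int)) : List (Option Int) × List (Option Int) :=
  let seq := trial_label
  let n := seq.length
  let odd0 : List (Option Int) := List.replicate n none
  let even0 : List (Option Int) := List.replicate n none
  let odd_trial := setStride2 true odd0 ((PySem.List.slice? seq none none 2).getD [])
  let even_trial := setStride2 false even0 ((PySem.List.slice? seq (some 1) none 2).getD [])
  (odd_trial, even_trial)

-- ===== PRECONDITION & SPEC =====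
def Spec_split_whole_trials_py (trial_label : List (Option Int)) (out : List (Option Int) × List (Option Int)) : Prop := out = split_whole_trials_py_alt trial_label
instance (trial_label : List (Option Int)) (out : List (Option Int) × List (Option Int)) : Decidable (Spec_split_whole_trials_py trial_label out) := by unfold Spec_split_whole_trials_py; infer_instance

-- ===== CLAIM (what is proved, stated in full; the proofs are below) =====
def Claim_equal_split_whole_trials_py : Prop := ∀ (trial_label : List (Option Int)), Dom_split_whole_trials_py trial_label → Spec_split_whole_trials_py trial_label (split_whole_trials_py trial_label)

-- ===== LEMMAS AND PROOFS =====

-- shared specification: prP b xs, where b says whether the next 1-based position is even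
def prP : Bool → List (Option Int) → List (Option Int) × List (Option Int)
  | _, [] => ([], [])
  | false, a :: xs => (a :: (prP true xs).1, none :: (prP true xs).2)
  | true, a :: xs => (none :: (prP false xs).1, a :: (prP false xs).2)

-- elements of xs at even 0-based indices
def everyOther : List (Option Int) → List (Option Int)
  | [] => []
  | [x] => [x]
  | x :: _ :: t => x :: everyOther t

theorem prP_swap (xs : List (Option Int)) : prP true xs = ((prP false xs).2, (prP false xs).1) := by
  induction xs with
  | nil => rfl
  | cons a t ih => simp [prP, ih]

theorem setStride2_false_cons (x : Option Int) (xs vs : List (Option Int)) :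
    setStride2 false (x :: xs) vs = x :: setStride2 true xs vs := by
  cases vs <;> simp [setStride2]

theorem stride_aux (xs : List (Option Int)) :
    (List.range ((xs.length + 1) / 2)).filterMap (fun k => xs[2 * k]?) = everyOther xs := by
  induction xs using everyOther.induct with
  | case1 => simp [everyOther]
  | case2 x =>
    norm_num [List.range_succ, everyOther]
    rw [List.filterMap_cons, List.filterMap_nil]
    rfl
  | case3 x y t ih =>
    have hlen : (x :: y :: t).length = t.length + 2 := by simp
    rw [hlen, show (t.length + 2 + 1) / 2 = (t.length + 1) / 2 + 1 from by omega,
      List.range_succ_eq_map, List.filterMap_cons, List.filterMap_map]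
    have hf : (fun k : Nat => (x :: y :: t)[2 * (k + 1)]?) = fun k : Nat => t[2 * k]? := by
      funext k
      rw [show 2 * (k + 1) = (2 * k + 1) + 1 from by ring]
      simp
    simp only [Function.comp_def, Nat.succ_eq_add_one, hf, ih, everyOther]
    simp

theorem sliceAll2 (xs : List (Option Int)) :
    (PySem.List.slice? xs none none 2).getD [] = everyOther xs := by
  rw [← stride_aux]
  simp only [PySem.List.slice?, PySem.List.sliceIndices]
  norm_num
  have hc : (if 0 < xs.length then (((xs.length : Int) + 2 - 1) / 2).toNat else 0) = (xs.length + 1) / 2 := by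
    split_ifs with h <;> omega
  have hf : (fun k : Nat => xs[((2 : Int) * ↑k).toNat]?) = fun k : Nat => xs[2 * k]? := by
    funext k; congr 1
  rw [hc, hf]

theorem sliceFrom1 (xs : List (Option Int)) :
    (PySem.List.slice? xs (some 1) none 2).getD [] = everyOther xs.tail := by
  cases xs with
  | nil => decide
  | cons x t =>
    rw [show (x :: t).tail = t from rfl, ← stride_aux]
    simp only [PySem.List.slice?, PySem.List.sliceIndices]
    norm_num
    have hc : (if 0 < t.length then (((t.length : Int) + 2 - 1) / 2).toNat else 0) = (t.length + 1) / 2 := by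
      split_ifs with h <;> omega
    have hf : (fun k : Nat => (x :: t)[((1 : Int) + 2 * ↑k).toNat]?) = fun k : Nat => t[2 * k]? := by
      funext k
      rw [show ((1 : Int) + 2 * ↑k).toNat = 2 * k + 1 from by omega]
      simp
    rw [hc, hf]

theorem oddB (xs : List (Option Int)) :
    setStride2 true (List.replicate xs.length none) (everyOther xs) = (prP false xs).1 := by
  induction xs using everyOther.induct with
  | case1 => simp [setStride2, everyOther, prP]
  | case2 x => simp [setStride2, everyOther, prP]
  | case3 x y t ih =>
    simp only [List.length_cons, List.replicate_succ, everyOther, setStride2,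
      setStride2_false_cons, prP, ih]

theorem evenB (xs : List (Option Int)) :
    setStride2 false (List.replicate xs.length none) (everyOther xs.tail) = (prP false xs).2 := by
  cases xs with
  | nil => simp [setStride2, everyOther, prP]
  | cons x t =>
    simp only [List.length_cons, List.replicate_succ, List.tail_cons, setStride2_false_cons,
      oddB, prP, prP_swap]

theorem foldA (xs : List (Option Int)) : ∀ (i : Int) (o e : List (Option Int)),
    List.foldl pvStepA (i, o, e) xs =
      (i + xs.length,
       o ++ (prP (decide ((i + 1) % 2 = 0)) xs).1,
       e ++ (prP (decide ((i + 1) % 2 = 0)) xs).2) := by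
  induction xs with
  | nil => intro i o e; simp [prP]
  | cons a t ih =>
    intro i o e
    by_cases h : (i + 1) % 2 = 0
    · have hb : decide ((i + 1) % 2 = 0) = true := by simp [h]
      have hb2 : decide ((i + 1 + 1) % 2 = 0) = false := by
        rw [decide_eq_false_iff_not]; omega
      have hstep : pvStepA (i, o, e) a = (i + 1, o ++ [none], e ++ [a]) := by
        simp [pvStepA, h]
      rw [List.foldl_cons, hstep, ih, hb, hb2]
      simp [prP, List.append_assoc]
      try omega
    · have hb : decide ((i + 1) % 2 = 0) = false := by
        rw [decide_eq_false_iff_not]; exact h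
      have hb2 : decide ((i + 1 + 1) % 2 = 0) = true := by
        rw [decide_eq_true_eq]; omega
      have hstep : pvStepA (i, o, e) a = (i + 1, o ++ [a], e ++ [none]) := by
        simp [pvStepA, h]
      rw [List.foldl_cons, hstep, ih, hb, hb2]
      simp [prP, List.append_assoc]
      try omega

-- ===== VERDICT (by name: the statement is the Claim_ definition above) =====
theorem split_whole_trials_py_spec : Claim_equal_split_whole_trials_py := by
  intro xs _
  unfold Spec_split_whole_trials_py
  simp only [split_whole_trials_py, foldA, split_whole_trials_py_alt, sliceAll2, sliceFrom1,
    oddB, evenB]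
  norm_num
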